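-- pv_equiv track=rewrite | github.com/njumathdy/OR-and-Optimization | Flow Shop Scheduling/flow.py | compile_solution
-- ===== SOURCE A (Python) =====
-- def compile_solution(data, perm):
--     # 给定工作安排，计算每个机器的时间表
--
--     num_machines = len(data[0])
--
--     machine_times = [[] for _ in range(num_machines)]
--
--     # 将第一个job分配给各个machine
--     machine_times[0].append(0)
--     for mach in range(1,num_machines):
--         machine_times[mach].append(machine_times[mach-1][0] + data[perm[0]][mach-1])
--
--     # 分配剩下的jobs
--     for i in range(1, len(perm)):
--
--         # 第一台机器从来不会有空闲时间
--         # job = perm[i]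
--         machine_times[0].append(machine_times[0][-1] + data[perm[i-1]][0])
--
--         # 对于其余的机器，其开始时间是max(该job的前一个task完成的时间，该机器完成前一个job的task的时间)
--         for mach in range(1, num_machines):
--             machine_times[mach].append(max(machine_times[mach-1][i] + data[perm[i]][mach-1],
--                                         machine_times[mach][i-1] + data[perm[i-1]][mach]))
--
--     return machine_times
-- ===== SOURCE B (Python) =====
-- def compile_solution(data, perm):
--     # Top-down memoized recurrence: start(mach, i) = start time of the i-th job of
--     # perm on machine mach; the table is then read off by two comprehensions.
--     num_machines = len(data[0])
--     cache = {}
--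
--     def start(mach, i):
--         if (mach, i) in cache:
--             return cache[(mach, i)]
--         if mach == 0 and i == 0:
--             v = 0
--         elif i == 0:
--             v = start(mach - 1, 0) + data[perm[0]][mach - 1]
--         elif mach == 0:
--             v = start(0, i - 1) + data[perm[i - 1]][0]
--         else:
--             v = max(start(mach - 1, i) + data[perm[i]][mach - 1],
--                     start(mach, i - 1) + data[perm[i - 1]][mach])
--         cache[(mach, i)] = v
--         return v
--
--     return [[start(mach, i) for i in range(len(perm))]
--             for mach in range(num_machines)]
-- ===== Notes on version B (the rewrite author's own statement) =====
-- stated objective: alternative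
-- what changed: B defines the start time by a top-down recursive memoized function start(mach,i) and reads the table off with comprehensions, instead of A's imperative machine-by-machine append loops into a pre-allocated mutable table.
-- intended difference: For zero jobs on a single machine (perm == [] with len(data[0]) == 1) A returns [[0]] - a phantom start time left over from unconditionally seeding machine 0 - while B returns the intended empty schedule [[]]. — e.g. on compile_solution([[3]], []): A returns [[0]], B returns [[]]
import Mathlib
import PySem

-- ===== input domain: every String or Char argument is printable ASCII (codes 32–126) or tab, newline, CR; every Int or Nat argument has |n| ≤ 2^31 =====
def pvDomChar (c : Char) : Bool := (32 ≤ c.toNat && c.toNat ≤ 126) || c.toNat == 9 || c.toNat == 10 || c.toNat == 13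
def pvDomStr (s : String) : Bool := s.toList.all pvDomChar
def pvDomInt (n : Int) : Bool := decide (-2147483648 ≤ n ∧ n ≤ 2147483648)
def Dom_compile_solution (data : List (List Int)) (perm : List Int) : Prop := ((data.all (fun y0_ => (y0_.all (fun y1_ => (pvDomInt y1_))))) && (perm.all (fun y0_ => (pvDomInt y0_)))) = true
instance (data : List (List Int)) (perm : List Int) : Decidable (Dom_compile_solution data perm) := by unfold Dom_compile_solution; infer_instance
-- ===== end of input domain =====

-- B replaces A's machine-by-machine in-place row appends by a top-down memoized
-- recurrence start(mach, i) read off into the table by two comprehensions; for zero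
-- jobs on one machine A returns a phantom [[0]], B the intended [[]] (see D_).


-- ===== PORT A =====
def compile_solution (data : List (List Int)) (perm : List Int) : List (List Int) :=
  let num_machines : Nat := (PySem.List.pyGetD data 0 []).length
  let mt0 : List (List Int) := List.replicate num_machines []
  -- machine_times[0].append(0)
  let mt1 := PySem.List.pySetD mt0 0 (PySem.List.pyGetD mt0 0 [] ++ [(0 : Int)])
  -- for mach in range(1, num_machines): machine_times[mach].append(…)
  let mt2 := (PySem.List.pyRange 1 (num_machines : Int) 1).foldl (fun mt mach =>
    PySem.List.pySetD mt mach (PySem.List.pyGetD mt mach [] ++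
      [PySem.List.pyGetD (PySem.List.pyGetD mt (mach - 1) []) 0 0 +
       PySem.List.pyGetD (PySem.List.pyGetD data (PySem.List.pyGetD perm 0 0) []) (mach - 1) 0])) mt1
  -- for i in range(1, len(perm)): …
  (PySem.List.pyRange 1 (perm.length : Int) 1).foldl (fun mt i =>
    let mt := PySem.List.pySetD mt 0 (PySem.List.pyGetD mt 0 [] ++
      [PySem.List.pyGetD (PySem.List.pyGetD mt 0 []) (-1) 0 +
       PySem.List.pyGetD (PySem.List.pyGetD data (PySem.List.pyGetD perm (i - 1) 0) []) 0 0]);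
    (PySem.List.pyRange 1 (num_machines : Int) 1).foldl (fun mt mach =>
      PySem.List.pySetD mt mach (PySem.List.pyGetD mt mach [] ++
        [max (PySem.List.pyGetD (PySem.List.pyGetD mt (mach - 1) []) i 0 +
              PySem.List.pyGetD (PySem.List.pyGetD data (PySem.List.pyGetD perm i 0) []) (mach - 1) 0)
             (PySem.List.pyGetD (PySem.List.pyGetD mt mach []) (i - 1) 0 +
              PySem.List.pyGetD (PySem.List.pyGetD data (PySem.List.pyGetD perm (i - 1) 0) []) mach 0)])) mt) mt2

-- ===== PORT B =====
-- d(j, k) = data[j][k] as Source B reads it (row index j may be negative, column k a Nat)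
def pvD (data : List (List Int)) (j : Int) (k : Nat) : Int :=
  PySem.List.pyGetD (PySem.List.pyGetD data j []) (k : Int) 0

-- Source B's recursive helper 'start(mach, i)'; the Python cache only shares these pure
-- calls, so it is ported as the recursion itself (branches in Source B's order).
def pvS (data : List (List Int)) (perm : List Int) : Nat → Nat → Int
  | 0, 0 => 0
  | mach + 1, 0 => pvS data perm mach 0 + pvD data (perm.getD 0 0) mach
  | 0, i + 1 => pvS data perm 0 i + pvD data (perm.getD i 0) 0
  | mach + 1, i + 1 =>
      max (pvS data perm mach (i + 1) + pvD data (perm.getD (i + 1) 0) mach)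
          (pvS data perm (mach + 1) i + pvD data (perm.getD i 0) (mach + 1))
  termination_by mach i => (mach, i)

def compile_solution_alt (data : List (List Int)) (perm : List Int) : List (List Int) :=
  let num_machines : Nat := (PySem.List.pyGetD data 0 []).length
  (List.range num_machines).map (fun mach =>
    (List.range perm.length).map (fun i => pvS data perm mach i))

-- ===== PRECONDITION & SPEC =====
-- Pre_ holds exactly when the Python A returns without an exception: data is nonempty with a
-- nonempty first row (else IndexError on data[0] / machine_times[0]), an empty perm needs a
-- single machine (else data[perm[0]] raises), and every perm entry that A actually indexes with
-- must be a valid (possibly negative) row index whose row is long enough for the columns A reads.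
def Pre_compile_solution (data : List (List Int)) (perm : List Int) : Prop :=
  data ≠ [] ∧ 1 ≤ (PySem.List.pyGetD data 0 []).length ∧
  (perm = [] → (PySem.List.pyGetD data 0 []).length = 1) ∧
  ∀ i : Nat, i < perm.length → (i + 1 < perm.length ∨ 2 ≤ (PySem.List.pyGetD data 0 []).length) →
    (PySem.Raise.InRange data.length (perm.getD i 0) ∧
     (if i + 1 < perm.length then (PySem.List.pyGetD data 0 []).length
      else (PySem.List.pyGetD data 0 []).length - 1) ≤
       (PySem.List.pyGetD data (perm.getD i 0) []).length)
instance (data : List (List Int)) (perm : List Int) : Decidable (Pre_compile_solution data perm) := by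
  unfold Pre_compile_solution; infer_instance

def pvWitness_compile_solution : List (List Int) × List Int := ([[1, 2], [3, 4]], [0, 1])

-- On zero jobs with exactly one machine A returns [[0]] — a phantom start time left over from
-- unconditionally seeding machine 0 — while B returns the intended empty schedule [[]].
def D_compile_solution (data : List (List Int)) (perm : List Int) : Prop :=
  data ≠ [] ∧ (PySem.List.pyGetD data 0 []).length = 1 ∧ perm = []
instance (data : List (List Int)) (perm : List Int) : Decidable (D_compile_solution data perm) := by
  unfold D_compile_solution; infer_instance

def Spec_compile_solution (data : List (List Int)) (perm : List Int) (out : List (List Int)) : Prop :=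
  ¬ D_compile_solution data perm → out = compile_solution_alt data perm
instance (data : List (List Int)) (perm : List Int) (out : List (List Int)) : Decidable (Spec_compile_solution data perm out) := by
  unfold Spec_compile_solution; infer_instance

def pvDiffWitness_compile_solution : List (List Int) × List Int := ([[3]], [])
def pvDiffWitnessOut_compile_solution : (List (List Int)) × (List (List Int)) := ([[0]], [[]])

-- ===== CLAIM (what is proved, stated in full; the proofs are below) =====
def Claim_unchanged_compile_solution : Prop := ∀ (data : List (List Int)) (perm : List Int), Dom_compile_solution data perm → Pre_compile_solution data perm → Spec_compile_solution data perm (compile_solution data perm)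
def Claim_changed_compile_solution : Prop := Dom_compile_solution (pvDiffWitness_compile_solution.1) (pvDiffWitness_compile_solution.2) ∧ Pre_compile_solution (pvDiffWitness_compile_solution.1) (pvDiffWitness_compile_solution.2) ∧ D_compile_solution (pvDiffWitness_compile_solution.1) (pvDiffWitness_compile_solution.2) ∧ compile_solution (pvDiffWitness_compile_solution.1) (pvDiffWitness_compile_solution.2) = pvDiffWitnessOut_compile_solution.1 ∧ compile_solution_alt (pvDiffWitness_compile_solution.1) (pvDiffWitness_compile_solution.2) = pvDiffWitnessOut_compile_solution.2 ∧ pvDiffWitnessOut_compile_solution.1 ≠ pvDiffWitnessOut_compile_solution.2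
def Claim_exact_compile_solution : Prop := ∀ (data : List (List Int)) (perm : List Int), Dom_compile_solution data perm → Pre_compile_solution data perm → D_compile_solution data perm → compile_solution data perm ≠ compile_solution_alt data perm

-- ===== LEMMAS AND PROOFS =====

-- A's intermediate table: rows 0..t hold i+1 start times, the remaining rows hold i of them
def pvMix (S : Nat → Nat → Int) (m t i : Nat) : List (List Int) :=
  (List.range m).map (fun mach => (List.range (if mach ≤ t then i + 1 else i)).map (S mach))

lemma pv_range_push {α : Type} (f : Nat → α) (c : Nat) :
    (List.range c).map f ++ [f c] = (List.range (c + 1)).map f := by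
  rw [List.range_succ, List.map_append]; rfl

lemma pv_getD_map_range {α : Type} [Inhabited α] (f : Nat → α) (c k : Nat) (d : α) (h : k < c) :
    PySem.List.pyGetD ((List.range c).map f) (k : Int) d = f k := by
  rw [PySem.List.pyGetD_natCast, PySem.List.getD_map_range]; simp [h]

lemma pv_last_map_range (f : Nat → Int) (c : Nat) :
    PySem.List.pyGetD ((List.range (c + 1)).map f) (-1) 0 = f c := by
  rw [← pv_range_push]
  exact PySem.List.pyGetD_neg_one_append_singleton _ _ _

lemma pvMix_get (S : Nat → Nat → Int) (m t i a : Nat) (ha : a < m) :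
    PySem.List.pyGetD (pvMix S m t i) (a : Int) [] =
      (List.range (if a ≤ t then i + 1 else i)).map (S a) := by
  unfold pvMix
  rw [pv_getD_map_range _ m a [] ha]

lemma pvMix_get0 (S : Nat → Nat → Int) (m t i : Nat) (hm : 1 ≤ m) :
    PySem.List.pyGetD (pvMix S m t i) 0 [] = (List.range (i + 1)).map (S 0) := by
  have h0 : (0 : Int) = ((0 : Nat) : Int) := rfl
  rw [h0, pvMix_get S m t i 0 hm]
  simp

lemma pv_set_map_range {α : Type} (m a : Nat) (f : Nat → α) (x : α) :
    ((List.range m).map f).set a x = (List.range m).map (fun k => if k = a then x else f k) := by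
  apply List.ext_getElem (by simp)
  intro i h1 h2
  simp only [List.getElem_set, List.getElem_map, List.getElem_range] at *
  by_cases hia : a = i <;> simp [hia, Ne.symm]

lemma pvMix_step (S : Nat → Nat → Int) (m b i : Nat) (hb : b + 1 < m) :
    PySem.List.pySetD (pvMix S m b i) ((b + 1 : Nat) : Int)
      (PySem.List.pyGetD (pvMix S m b i) ((b + 1 : Nat) : Int) [] ++ [S (b + 1) i]) =
      pvMix S m (b + 1) i := by
  rw [pvMix_get S m b i (b + 1) hb, if_neg (by omega), PySem.List.pySetD_natCast,
      pv_range_push]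
  unfold pvMix
  rw [pv_set_map_range]
  apply List.map_congr_left
  intro k _
  by_cases hk : k = b + 1
  · subst hk; simp
  · have : (k ≤ b + 1) = (k ≤ b) := by
      by_cases h : k ≤ b <;> simp [h] <;> omega
    simp [hk, this]

lemma pvMix_push0 (S : Nat → Nat → Int) (m i : Nat) (hm : 1 ≤ m) :
    PySem.List.pySetD (pvMix S m (m - 1) i) 0
      (PySem.List.pyGetD (pvMix S m (m - 1) i) 0 [] ++ [S 0 (i + 1)]) = pvMix S m 0 (i + 1) := by
  have h0 : (0 : Int) = ((0 : Nat) : Int) := rfl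
  rw [pvMix_get0 S m (m - 1) i hm, pv_range_push, h0, PySem.List.pySetD_natCast]
  unfold pvMix
  rw [pv_set_map_range]
  apply List.map_congr_left
  intro k hk
  by_cases hk0 : k = 0
  · subst hk0; simp
  · have hkm : k ≤ m - 1 := by simp at hk; omega
    simp [hk0, hkm]

lemma pv_seed (S : Nat → Nat → Int) (m : Nat) (hm : 1 ≤ m) (hS0 : S 0 0 = 0) :
    PySem.List.pySetD (List.replicate m ([] : List Int)) 0
      (PySem.List.pyGetD (List.replicate m ([] : List Int)) 0 [] ++ [(0 : Int)]) =
      pvMix S m 0 0 := by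
  obtain ⟨m', rfl⟩ : ∃ m', m = m' + 1 := ⟨m - 1, by omega⟩
  have h0 : (0 : Int) = ((0 : Nat) : Int) := rfl
  rw [h0, PySem.List.pySetD_natCast]
  simp only [List.replicate_succ, PySem.List.pyGetD_natCast]
  apply List.ext_getElem (by simp [pvMix])
  intro i h1 h2
  unfold pvMix
  rcases i with _ | i
  · simp [hS0]
  · simp

-- 'for mach in range(1, m)' with a loop invariant inv: one cons-step per iteration
lemma pv_fold1 {α : Type} (step : α → Int → α) (inv : Nat → α) (m : Nat) (hm : 1 ≤ m)
    (h : ∀ b : Nat, b + 1 < m → step (inv (b + 1)) ((b + 1 : Nat) : Int) = inv (b + 2)) :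
    (PySem.List.pyRange 1 (m : Int) 1).foldl step (inv 1) = inv m := by
  suffices haux : ∀ k a : Nat, m - a = k → 1 ≤ a → a ≤ m →
      (PySem.List.pyRange (a : Int) (m : Int) 1).foldl step (inv a) = inv m by
    have := haux (m - 1) 1 rfl le_rfl hm
    simpa using this
  intro k
  induction k with
  | zero =>
    intro a hk h1 h2
    have ham : a = m := by omega
    subst ham
    rw [PySem.List.pyRange_one_eq_nil le_rfl]
    rfl
  | succ k ih =>
    intro a hk h1 h2
    have ham : a < m := by omega
    rw [PySem.List.pyRange_one_cons (by exact_mod_cast ham)]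
    simp only [List.foldl_cons]
    obtain ⟨b, rfl⟩ : ∃ b, a = b + 1 := ⟨a - 1, by omega⟩
    rw [h b ham]
    have hc : ((b + 1 : Nat) : Int) + 1 = ((b + 2 : Nat) : Int) := by push_cast; ring
    rw [hc]
    exact ih (b + 2) (by omega) (by omega) (by omega)

-- ===== A equals the table of the recurrence =====
lemma pvS_m0 (data : List (List Int)) (perm : List Int) (mach : Nat) :
    pvS data perm (mach + 1) 0 = pvS data perm mach 0 + pvD data (perm.getD 0 0) mach := by
  rw [pvS]

lemma pvS_0i (data : List (List Int)) (perm : List Int) (i : Nat) :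
    pvS data perm 0 (i + 1) = pvS data perm 0 i + pvD data (perm.getD i 0) 0 := by
  rw [pvS]

lemma pvS_mi (data : List (List Int)) (perm : List Int) (mach i : Nat) :
    pvS data perm (mach + 1) (i + 1) =
      max (pvS data perm mach (i + 1) + pvD data (perm.getD (i + 1) 0) mach)
          (pvS data perm (mach + 1) i + pvD data (perm.getD i 0) (mach + 1)) := by
  rw [pvS]

lemma pv_A_eq_table (data : List (List Int)) (perm : List Int)
    (hm : 1 ≤ (PySem.List.pyGetD data 0 []).length) (hn : perm ≠ []) :
    compile_solution data perm =
      (List.range (PySem.List.pyGetD data 0 []).length).map (fun mach =>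
        (List.range perm.length).map (fun i => pvS data perm mach i)) := by
  simp only [compile_solution]
  set S := pvS data perm with hS
  set m := (PySem.List.pyGetD data 0 []).length with hmdef
  set n := perm.length with hndef
  have hn1 : 1 ≤ n := by
    have := List.length_pos_of_ne_nil hn
    omega
  rw [pv_seed S m hm (by rw [hS, pvS])]
  rw [pv_fold1 _ (fun a => pvMix S m (a - 1) 0) m hm ?h1]
  case h1 =>
    intro b hb
    simp only [Nat.add_sub_cancel]
    have hc : ((b + 1 : Nat) : Int) - 1 = (b : Int) := by push_cast; ring
    simp only [hc]
    rw [pvMix_get S m b 0 b (by omega), if_pos (le_refl b)]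
    simp only [Nat.zero_add, List.range_one, List.map_cons, List.map_nil]
    rw [PySem.List.pyGetD_zero_cons, PySem.List.pyGetD_zero]
    have hv : PySem.List.pyGetD (PySem.List.pyGetD data (perm.getD 0 0) []) (b : Int) 0 =
        pvD data (perm.getD 0 0) b := rfl
    rw [hv]
    rw [show S b 0 + pvD data (perm.getD 0 0) b = S (b + 1) 0 from (pvS_m0 data perm b).symm]
    exact pvMix_step S m b 0 hb
  rw [pv_fold1 _ (fun i => pvMix S m (m - 1) (i - 1)) n hn1 ?hO]
  case hO =>
    intro j hj
    simp only [Nat.add_sub_cancel]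
    have hc : ((j + 1 : Nat) : Int) - 1 = (j : Int) := by push_cast; ring
    simp only [hc]
    rw [pvMix_get0 S m (m - 1) j hm]
    rw [pv_last_map_range (fun i => S 0 i) j, PySem.List.pyGetD_natCast perm j 0]
    have hv : PySem.List.pyGetD (PySem.List.pyGetD data (perm.getD j 0) []) 0 0 =
        pvD data (perm.getD j 0) 0 := rfl
    rw [hv]
    rw [show S 0 j + pvD data (perm.getD j 0) 0 = S 0 (j + 1) from (pvS_0i data perm j).symm]
    rw [← pvMix_get0 S m (m - 1) j hm]
    rw [pvMix_push0 S m j hm]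
    rw [pv_fold1 _ (fun a => pvMix S m (a - 1) (j + 1)) m hm ?hI]
    case hI =>
      intro b hb
      simp only [Nat.add_sub_cancel]
      have hcb : ((b + 1 : Nat) : Int) - 1 = (b : Int) := by push_cast; ring
      simp only [hcb]
      rw [pvMix_get S m b (j + 1) b (by omega), if_pos (le_refl b)]
      rw [pvMix_get S m b (j + 1) (b + 1) hb, if_neg (by omega)]
      rw [pv_getD_map_range (fun i => S b i) (j + 2) (j + 1) 0 (by omega)]
      rw [pv_getD_map_range (fun i => S (b + 1) i) (j + 1) j 0 (by omega)]
      rw [PySem.List.pyGetD_natCast perm (j + 1) 0]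
      have hv1 : PySem.List.pyGetD (PySem.List.pyGetD data (perm.getD (j + 1) 0) []) (b : Int) 0 =
          pvD data (perm.getD (j + 1) 0) b := rfl
      have hv2 : PySem.List.pyGetD (PySem.List.pyGetD data (perm.getD j 0) []) ((b + 1 : Nat) : Int) 0 =
          pvD data (perm.getD j 0) (b + 1) := rfl
      rw [hv1, hv2]
      rw [show max (S b (j + 1) + pvD data (perm.getD (j + 1) 0) b)
              (S (b + 1) j + pvD data (perm.getD j 0) (b + 1)) = S (b + 1) (j + 1) from
            (pvS_mi data perm b j).symm]
      rw [show List.map (S (b + 1)) (List.range (j + 1)) =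
            PySem.List.pyGetD (pvMix S m b (j + 1)) ((b + 1 : Nat) : Int) [] from by
          rw [pvMix_get S m b (j + 1) (b + 1) hb, if_neg (by omega)]]
      exact pvMix_step S m b (j + 1) hb
    rfl
  show pvMix S m (m - 1) (n - 1) = _
  unfold pvMix
  apply List.map_congr_left
  intro mach hmach
  rw [if_pos (by simp at hmach; omega)]
  have hnn : n - 1 + 1 = n := by omega
  rw [hnn]

-- ===== VERDICT (by name: the statement is the Claim_ definition above) =====
theorem compile_solution_spec : Claim_unchanged_compile_solution := by
  intro data perm _ hpre hnd
  obtain ⟨hne, hm, hlen1, _⟩ := hpre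
  have hn : perm ≠ [] := by
    intro hp
    exact hnd ⟨hne, hlen1 hp, hp⟩
  rw [pv_A_eq_table data perm hm hn]
  simp only [compile_solution_alt]
theorem compile_solution_changed : Claim_changed_compile_solution := by
  unfold Claim_changed_compile_solution; decide
theorem compile_solution_tight : Claim_exact_compile_solution := by
  intro data perm _ _ hd
  obtain ⟨hne, hlen1, hpe⟩ := hd
  subst hpe
  have hA : compile_solution data [] = [[0]] := by
    simp only [compile_solution, hlen1, List.length_nil, Nat.cast_one, Nat.cast_zero]
    rw [PySem.List.pyRange_one_eq_nil (by norm_num : (1 : Int) ≤ 1),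
        PySem.List.pyRange_one_eq_nil (by norm_num : (0 : Int) ≤ 1)]
    simp only [List.foldl_nil, List.replicate_one]
    rw [PySem.List.pyGetD_zero_cons]
    rw [show (0 : Int) = ((0 : Nat) : Int) from rfl, PySem.List.pySetD_natCast]
    rfl
  have hB : compile_solution_alt data [] = [[]] := by
    simp [compile_solution_alt, hlen1]
  rw [hA, hB]
  simp
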